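-- pv_equiv track=rewrite | github.com/RengarAndKhz/QuoraInterview | ABMachine.py | dsfSolver
-- ===== SOURCE A (Python) =====
-- def dsfSolver(target):
--     x,y = 1,1
--     layer = 0
--     queue = [("A", x, y, layer+1), ("B", x, y, layer+1)]
--
--     while x != target and y != target:
--         operation, x, y, layer = queue.pop(0)
--         if operation == "A":
--             x += y
--         else:
--             y += x
--         queue.append(("A", x, y, layer+1))
--         queue.append(("B", x, y, layer+1))
--     return layer
-- ===== SOURCE B (Python) =====
-- def dsfSolver(target):
--     # Enumerate the nodes of A's implicit binary tree by heap index instead of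
--     # simulating a queue: node m (1-based, root m=1) has state obtained by
--     # replaying the bits of m below its leading 1 (0 -> x+=y, 1 -> y+=x),
--     # and depth m.bit_length()-1.  O(1) memory, no quadratic list.pop(0).
--     m = 1
--     while True:
--         x, y = 1, 1
--         for c in bin(m)[3:]:
--             if c == '0':
--                 x += y
--             else:
--                 y += x
--         if x == target or y == target:
--             return m.bit_length() - 1
--         m += 1
-- ===== Notes on version B (the rewrite author's own statement) =====
-- stated objective: faster
-- what changed: B drops A's explicit FIFO queue and enumerates the same implicit binary tree by heap index, decoding each node's x+=y / y+=x operations from the binary digits of the index and its depth from the bit length, so there is no queue at all (O(1) memory) and no quadratic list.pop(0).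
import Mathlib
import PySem

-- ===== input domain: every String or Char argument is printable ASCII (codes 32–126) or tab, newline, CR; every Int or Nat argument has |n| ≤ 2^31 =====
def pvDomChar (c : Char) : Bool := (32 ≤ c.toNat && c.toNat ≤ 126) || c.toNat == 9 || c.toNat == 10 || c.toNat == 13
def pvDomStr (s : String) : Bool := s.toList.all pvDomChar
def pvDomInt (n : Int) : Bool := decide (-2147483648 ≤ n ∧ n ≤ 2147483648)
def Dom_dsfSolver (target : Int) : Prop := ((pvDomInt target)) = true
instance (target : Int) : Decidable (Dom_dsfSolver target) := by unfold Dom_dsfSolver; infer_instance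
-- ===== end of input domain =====

-- B replaces A's queue-driven BFS by an enumeration of the same implicit binary
-- tree via heap indices, decoding each node's state from the index's binary
-- digits: O(1) memory, no quadratic list.pop(0); measurably faster.

-- ===== PORT A =====
-- Python's unbounded `while` loop is made total with fuel; the fuel-exhausted
-- branch returns the current `layer` variable (the fuel can only run out where
-- the Python while loop never terminates, i.e. for target ≤ 0).
def dsfAux : Nat → Int → Int → Int → Int → List (String × Int × Int × Int) → Int
  | 0, _, _, _, layer, _ => layer
  | fuel + 1, target, x, y, layer, queue =>
    if x ≠ target ∧ y ≠ target then
      match queue with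
      | [] => layer  -- unreachable: the queue always holds ≥ 2 entries
      | (operation, x', y', l) :: rest =>
        let s := if operation = "A" then (x' + y', y') else (x', y' + x')
        dsfAux fuel target s.1 s.2 l
          (rest ++ [("A", s.1, s.2, l + 1), ("B", s.1, s.2, l + 1)])
    else layer

def dsfSolver (target : Int) : Int :=
  dsfAux (2 ^ (target.toNat + 2)) target 1 1 0
    [("A", 1, 1, 0 + 1), ("B", 1, 1, 0 + 1)]

-- ===== PORT B =====
-- bin(m)[3:] : the binary digits of m below its leading 1, most significant first
def pvBits (m : Nat) : List Bool :=
  if _h : m ≤ 1 then [] else pvBits (m / 2) ++ [m % 2 == 1]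
decreasing_by exact Nat.div_lt_self (by omega) (by omega)

-- the inner `for c in bin(m)[3:]` loop of Source B
def pvStateOf (m : Nat) : Int × Int :=
  (pvBits m).foldl
    (fun (p : Int × Int) b => if b then (p.1, p.2 + p.1) else (p.1 + p.2, p.2))
    (1, 1)

-- the outer `while True` loop of Source B, made total with fuel; the junk value at
-- fuel 0 (Python diverges there) is the depth of the node reached
def dsfAltAux : Nat → Int → Nat → Int
  | 0, _, m => (Nat.log2 m : Int)
  | fuel + 1, target, m =>
    let s := pvStateOf m
    if s.1 = target ∨ s.2 = target then (Nat.log2 m : Int)  -- m.bit_length() - 1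
    else dsfAltAux fuel target (m + 1)

def dsfSolver_alt (target : Int) : Int :=
  dsfAltAux (2 ^ (target.toNat + 2)) target 1

-- ===== PRECONDITION & SPEC =====
def Spec_dsfSolver (target : Int) (out : Int) : Prop := out = dsfSolver_alt target
instance (target : Int) (out : Int) : Decidable (Spec_dsfSolver target out) := by
  unfold Spec_dsfSolver; infer_instance

-- ===== CLAIM (what is proved, stated in full; the proofs are below) =====
def Claim_equal_dsfSolver : Prop :=
  ∀ (target : Int), Dom_dsfSolver target → Spec_dsfSolver target (dsfSolver target)

-- ===== LEMMAS AND PROOFS =====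

-- the queue entry produced for node j (j ≥ 2): its operation is determined by
-- j's parity, its stored state is the parent's, its layer is the node's depth
def pvEntry (j : Nat) : String × Int × Int × Int :=
  (if j % 2 = 0 then "A" else "B",
   (pvStateOf (j / 2)).1, (pvStateOf (j / 2)).2, (Nat.log2 j : Int))

theorem pvBits_even {m : Nat} (h : 1 ≤ m) :
    pvBits (2 * m) = pvBits m ++ [false] := by
  rw [pvBits, dif_neg (by omega : ¬ 2 * m ≤ 1),
      show 2 * m / 2 = m by omega, show 2 * m % 2 = 0 by omega]
  rfl

theorem pvBits_odd {m : Nat} (h : 1 ≤ m) :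
    pvBits (2 * m + 1) = pvBits m ++ [true] := by
  rw [pvBits, dif_neg (by omega : ¬ 2 * m + 1 ≤ 1),
      show (2 * m + 1) / 2 = m by omega, show (2 * m + 1) % 2 = 1 by omega]
  rfl

theorem pvStateOf_even {m : Nat} (h : 1 ≤ m) :
    pvStateOf (2 * m) = ((pvStateOf m).1 + (pvStateOf m).2, (pvStateOf m).2) := by
  unfold pvStateOf
  rw [pvBits_even h, List.foldl_append]
  simp

theorem pvStateOf_odd {m : Nat} (h : 1 ≤ m) :
    pvStateOf (2 * m + 1) = ((pvStateOf m).1, (pvStateOf m).2 + (pvStateOf m).1) := by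
  unfold pvStateOf
  rw [pvBits_odd h, List.foldl_append]
  simp

theorem log2_double_add {m r : Nat} (h : 1 ≤ m) (hr : r ≤ 1) :
    Nat.log2 (2 * m + r) = Nat.log2 m + 1 := by
  rw [Nat.log2_def, if_pos (by omega : 2 * m + r ≥ 2), show (2 * m + r) / 2 = m by omega]

-- the main invariant: with current node m (state pvStateOf m, layer log2 m)
-- and queue = entries for nodes m+1 .. 2m+1, A's loop computes B's loop
theorem pvEntry_state {m : Nat} (hm : 1 ≤ m) :
    (if (pvEntry (m + 1)).1 = "A"
      then ((pvEntry (m + 1)).2.1 + (pvEntry (m + 1)).2.2.1, (pvEntry (m + 1)).2.2.1)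
      else ((pvEntry (m + 1)).2.1, (pvEntry (m + 1)).2.2.1 + (pvEntry (m + 1)).2.1))
    = pvStateOf (m + 1) := by
  unfold pvEntry
  rcases Nat.even_or_odd (m + 1) with he | ho
  · obtain ⟨k, hk⟩ := he
    have hk1 : 1 ≤ k := by omega
    rw [show m + 1 = 2 * k by omega, pvStateOf_even hk1]
    simp [show (2 * k) % 2 = 0 by omega, show 2 * k / 2 = k by omega]
  · obtain ⟨k, hk⟩ := ho
    have hk1 : 1 ≤ k := by omega
    rw [hk, pvStateOf_odd hk1]
    simp [show (2 * k + 1) % 2 = 1 by omega, show (2 * k + 1) / 2 = k by omega]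

theorem pvQueue_step {m : Nat} (hm : 1 ≤ m) :
    (List.range' (m + 2) m).map pvEntry ++
      [("A", (pvStateOf (m + 1)).1, (pvStateOf (m + 1)).2, ((Nat.log2 (m + 1) : Int)) + 1),
       ("B", (pvStateOf (m + 1)).1, (pvStateOf (m + 1)).2, ((Nat.log2 (m + 1) : Int)) + 1)]
    = (List.range' (m + 2) (m + 2)).map pvEntry := by
  have h1 : List.range' (m + 2) (m + 2) = List.range' (m + 2) m ++ [2 * m + 2, 2 * m + 3] := by
    have a2 : List.range' (m + 2) (m + 1) = List.range' (m + 2) m ++ [2 * m + 2] := by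
      simpa [show m + 2 + m = 2 * m + 2 from by omega] using
        List.range'_concat (s := m + 2) (n := m) (step := 1)
    have a1 : List.range' (m + 2) (m + 2) = List.range' (m + 2) (m + 1) ++ [2 * m + 3] := by
      simpa [show m + 2 + (m + 1) = 2 * m + 3 from by omega] using
        List.range'_concat (s := m + 2) (n := m + 1) (step := 1)
    rw [a1, a2, List.append_assoc]
    rfl
  have hA : pvEntry (2 * m + 2) =
      ("A", (pvStateOf (m + 1)).1, (pvStateOf (m + 1)).2, ((Nat.log2 (m + 1) : Int)) + 1) := by
    unfold pvEntry
    rw [show (2 * m + 2) / 2 = m + 1 by omega,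
        show 2 * m + 2 = 2 * (m + 1) + 0 by omega, log2_double_add (by omega) (by omega)]
    simp
  have hB : pvEntry (2 * m + 3) =
      ("B", (pvStateOf (m + 1)).1, (pvStateOf (m + 1)).2, ((Nat.log2 (m + 1) : Int)) + 1) := by
    unfold pvEntry
    rw [show (2 * m + 3) / 2 = m + 1 by omega,
        show 2 * m + 3 = 2 * (m + 1) + 1 by omega, log2_double_add (by omega) (by omega)]
    simp
  rw [h1, List.map_append, List.map_cons, List.map_cons, List.map_nil, hA, hB]

theorem dsfAux_cons (fuel : Nat) (target x y layer : Int) (operation : String)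
    (x' y' l : Int) (rest : List (String × Int × Int × Int)) :
    dsfAux (fuel + 1) target x y layer ((operation, x', y', l) :: rest) =
      if x ≠ target ∧ y ≠ target then
        dsfAux fuel target
          (if operation = "A" then (x' + y', y') else (x', y' + x')).1
          (if operation = "A" then (x' + y', y') else (x', y' + x')).2 l
          (rest ++
            [("A", (if operation = "A" then (x' + y', y') else (x', y' + x')).1,
                   (if operation = "A" then (x' + y', y') else (x', y' + x')).2, l + 1),
             ("B", (if operation = "A" then (x' + y', y') else (x', y' + x')).1,
                   (if operation = "A" then (x' + y', y') else (x', y' + x')).2, l + 1)])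
      else layer := rfl

theorem dsfAltAux_succ (fuel : Nat) (target : Int) (m : Nat) :
    dsfAltAux (fuel + 1) target m =
      if (pvStateOf m).1 = target ∨ (pvStateOf m).2 = target then (Nat.log2 m : Int)
      else dsfAltAux fuel target (m + 1) := rfl

theorem dsfAux_eq_alt (fuel : Nat) :
    ∀ (target : Int) (m : Nat), 1 ≤ m →
      dsfAux fuel target (pvStateOf m).1 (pvStateOf m).2 (Nat.log2 m : Int)
        ((List.range' (m + 1) (m + 1)).map pvEntry)
      = dsfAltAux fuel target m := by
  induction fuel with
  | zero => intro target m hm; rfl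
  | succ fuel ih =>
    intro target m hm
    rw [List.range'_succ, List.map_cons, dsfAltAux_succ,
        show pvEntry (m + 1) = ((pvEntry (m + 1)).1, (pvEntry (m + 1)).2.1,
          (pvEntry (m + 1)).2.2.1, (pvEntry (m + 1)).2.2.2) from rfl,
        dsfAux_cons]
    by_cases hhit : (pvStateOf m).1 = target ∨ (pvStateOf m).2 = target
    · rw [if_neg (by tauto), if_pos hhit]
    · rw [if_pos (by tauto), if_neg hhit, pvEntry_state hm,
          show (pvEntry (m + 1)).2.2.2 = (Nat.log2 (m + 1) : Int) from rfl,
          pvQueue_step hm]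
      exact ih target (m + 1) (by omega)

theorem dsfSolver_eq (target : Int) : dsfSolver target = dsfSolver_alt target := by
  unfold dsfSolver dsfSolver_alt
  have h := dsfAux_eq_alt (2 ^ (target.toNat + 2)) target 1 (le_refl 1)
  have h1 : pvStateOf 1 = (1, 1) := by
    unfold pvStateOf; rw [pvBits, dif_pos (by omega : (1 : Nat) ≤ 1)]; rfl
  have hq : (List.range' 2 2).map pvEntry = [("A", 1, 1, (0 : Int) + 1), ("B", 1, 1, (0 : Int) + 1)] := by
    rw [show List.range' 2 2 = [2, 3] from rfl]
    simp only [List.map_cons, List.map_nil, pvEntry]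
    norm_num [h1, show Nat.log2 2 = 1 from rfl, show Nat.log2 3 = 1 from rfl]
  rw [hq, h1] at h
  simpa using h

-- ===== VERDICT (by name: the statement is the Claim_ definition above) =====
theorem dsfSolver_spec : Claim_equal_dsfSolver := by
  intro target _
  exact dsfSolver_eq target
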